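-- pv_equiv track=rewrite | github.com/Limix-1/personal-toolbox | tool/tool3_discard.py | compare_tool
-- ===== SOURCE A (Python) =====
-- def compare_tool(each_input, dataset):
--     value = []
--     value.append(each_input)
--     for each in dataset:
--         if len(each) >= (len(each_input)/2):
--             if each in each_input:
--                 value.append(each)
--     # 输出为[筛选目标, 结果1, 结果2 ....]
--     return value
-- ===== SOURCE B (Python) =====
-- def compare_tool(each_input, dataset):
--     # Precompute, for each candidate length that can possibly match, the set of
--     # substrings of each_input of that length; each candidate is then one set lookup.
--     n = len(each_input)
--     want = {len(d) for d in dataset if 2 * len(d) >= n and len(d) <= n}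
--     subs = set()
--     for L in want:
--         for i in range(n - L + 1):
--             subs.add(each_input[i:i + L])
--     return [each_input] + [d for d in dataset if d in subs]
-- ===== Notes on version B (the rewrite author's own statement) =====
-- stated objective: alternative
-- what changed: Instead of scanning each_input once per candidate, B precomputes a hash set of all substrings of each_input whose lengths are the eligible candidate lengths present in the dataset, and answers each candidate with a single set lookup.
import Mathlib
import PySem

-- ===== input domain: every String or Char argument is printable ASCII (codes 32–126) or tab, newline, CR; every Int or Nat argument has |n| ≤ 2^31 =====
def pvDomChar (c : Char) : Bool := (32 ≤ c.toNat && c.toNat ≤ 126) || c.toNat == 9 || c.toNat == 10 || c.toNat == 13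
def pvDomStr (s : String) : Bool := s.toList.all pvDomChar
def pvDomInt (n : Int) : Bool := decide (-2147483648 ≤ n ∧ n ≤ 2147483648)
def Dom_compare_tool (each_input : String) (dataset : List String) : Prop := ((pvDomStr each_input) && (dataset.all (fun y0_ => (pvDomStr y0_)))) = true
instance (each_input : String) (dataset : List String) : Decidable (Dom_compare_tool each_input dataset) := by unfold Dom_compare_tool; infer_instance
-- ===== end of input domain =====

-- B precomputes the set of all long-enough substrings of each_input once, then answers
-- each candidate with a single set lookup instead of a scan (objective: alternative).

-- ===== PORT A =====
-- 'len(each) >= len(each_input)/2': float halving of an int length is exact, so the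
-- test is ported as the exact integer inequality len(each_input) ≤ 2*len(each).
def compare_tool (each_input : String) (dataset : List String) : List String :=
  dataset.foldl (fun value each =>
    if PySem.Str.len each_input ≤ 2 * PySem.Str.len each then
      if PySem.Str.isIn each each_input then value ++ [each] else value
    else value) [each_input]

-- ===== PORT B =====
def compare_tool_alt (each_input : String) (dataset : List String) : List String :=
  let n : Int := PySem.Str.len each_input
  let want : PySem.Set Int := PySem.Set.ofList
    ((dataset.filter (fun d => decide (2 * PySem.Str.len d ≥ n) && decide (PySem.Str.len d ≤ n))).map
      (fun d => PySem.Str.len d))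
  let subs : PySem.Set String :=
    want.foldl (fun subs L =>
      (PySem.List.pyRange 0 (n - L + 1) 1).foldl (fun subs i =>
        PySem.Set.add subs (PySem.Str.slice each_input (some i) (some (i + L)))) subs)
      PySem.Set.empty
  each_input :: dataset.filter (fun d => PySem.Set.contains subs d)

-- ===== PRECONDITION & SPEC =====
def Spec_compare_tool (each_input : String) (dataset : List String) (out : List String) : Prop := out = compare_tool_alt each_input dataset
instance (each_input : String) (dataset : List String) (out : List String) : Decidable (Spec_compare_tool each_input dataset out) := by unfold Spec_compare_tool; infer_instance

-- ===== CLAIM (what is proved, stated in full; the proofs are below) =====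
def Claim_equal_compare_tool : Prop := ∀ (each_input : String) (dataset : List String), Dom_compare_tool each_input dataset → Spec_compare_tool each_input dataset (compare_tool each_input dataset)

-- ===== LEMMAS AND PROOFS =====

-- membership in the nested substring-collecting loop of B
theorem pv_mem_double_foldl (outer : List Int) (g : Int → List Int) (f : Int → Int → String)
    (init : PySem.Set String) (y : String) :
    (y ∈ outer.foldl (fun s L => (g L).foldl (fun s i => PySem.Set.add s (f L i)) s) init) ↔
      y ∈ init ∨ ∃ L ∈ outer, ∃ i ∈ g L, y = f L i := by
  induction outer generalizing init with
  | nil => simp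
  | cons L rest ih =>
    simp only [List.foldl_cons, ih, PySem.Set.mem_foldl_add, List.mem_cons]
    constructor
    · rintro ((h | ⟨i, hi, rfl⟩) | ⟨M, hM, i, hi, rfl⟩)
      · exact Or.inl h
      · exact Or.inr ⟨L, Or.inl rfl, i, hi, rfl⟩
      · exact Or.inr ⟨M, Or.inr hM, i, hi, rfl⟩
    · rintro (h | ⟨M, (rfl | hM), i, hi, rfl⟩)
      · exact Or.inl (Or.inl h)
      · exact Or.inl (Or.inr ⟨i, hi, rfl⟩)
      · exact Or.inr ⟨M, hM, i, hi, rfl⟩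

-- what B's substring set contains, for a candidate d drawn from the dataset:
-- exactly "d is long enough and a substring of s"
theorem pv_mem_subs (s d : String) (ds : List String) (hd : d ∈ ds) :
    (d ∈ (PySem.Set.ofList
        ((ds.filter (fun d => decide (2 * PySem.Str.len d ≥ PySem.Str.len s) && decide (PySem.Str.len d ≤ PySem.Str.len s))).map
          (fun d => PySem.Str.len d))).foldl
        (fun subs L => (PySem.List.pyRange 0 ((PySem.Str.len s) - L + 1) 1).foldl
          (fun subs i => PySem.Set.add subs (PySem.Str.slice s (some i) (some (i + L)))) subs)
        PySem.Set.empty) ↔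
      ((s.toList.length : Int) ≤ 2 * (d.toList.length : Int) ∧ d.toList <:+: s.toList) := by
  rw [pv_mem_double_foldl]
  simp only [PySem.Set.empty, List.not_mem_nil, false_or, PySem.List.mem_pyRange_one,
    PySem.Set.mem_ofList, List.mem_map, List.mem_filter, Bool.and_eq_true, decide_eq_true_eq,
    PySem.Str.len_eq]
  constructor
  · rintro ⟨L, ⟨d', ⟨hd', hlong, hshort⟩, rfl⟩, i, ⟨hi0, hin⟩, rfl⟩
    obtain ⟨j, rfl⟩ := Int.eq_ofNat_of_zero_le hi0
    have htl : (PySem.Str.slice s (some (j : Int))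
          (some ((j : Int) + (d'.toList.length : Int)))).toList
        = (s.toList.drop j).take d'.toList.length := by
      simp [PySem.Str.slice]
      exact PySem.List.slice_natCast_add s.toList j d'.toList.length
    have hjm : j + d'.toList.length ≤ s.toList.length := by omega
    have hlen : ((s.toList.drop j).take d'.toList.length).length = d'.toList.length := by
      rw [List.length_take, List.length_drop]; omega
    constructor
    · rw [htl, hlen]; omega
    · rw [htl]
      exact List.infix_iff_prefix_suffix.mpr
        ⟨s.toList.drop j, List.take_prefix _ _, List.drop_suffix _ _⟩
  · rintro ⟨hlen, hinf⟩
    have hisIn : PySem.Chars.isIn d.toList s.toList = true := by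
      have h := PySem.Str.isIn_iff_infix d s |>.mpr hinf
      rwa [PySem.Str.isIn_eq] at h
    obtain ⟨j, hpre⟩ := (PySem.Chars.exists_prefix_drop_iff_isIn d.toList s.toList).mpr hisIn
    set k := min j (s.toList.length - d.toList.length) with hk
    have hdn : d.toList.length ≤ s.toList.length := hinf.length_le
    have hdle : d.toList.length ≤ s.toList.length - j := by
      have h := hpre.length_le
      rwa [List.length_drop] at h
    have hpre' : d.toList <+: List.drop k s.toList := by
      rcases Nat.eq_zero_or_pos d.toList.length with h0 | hp
      · rw [List.length_eq_zero_iff.mp h0]; exact List.nil_prefix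
      · have hjk : k = j := by rw [hk]; omega
        rw [hjk]; exact hpre
    have hkb : k ≤ s.toList.length - d.toList.length := by rw [hk]; exact min_le_right _ _
    have htake := List.prefix_iff_eq_take.mp hpre'
    refine ⟨(d.toList.length : Int), ⟨d, ⟨hd, by omega, by omega⟩, rfl⟩,
      ((k : Nat) : Int), ⟨by positivity, by omega⟩, ?_⟩
    apply String.toList_inj.mp
    have hstep : (PySem.Str.slice s (some ((k : Nat) : Int))
          (some (((k : Nat) : Int) + (d.toList.length : Int)))).toList
        = PySem.List.slice s.toList (some ((k : Nat) : Int))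
            (some (((k : Nat) : Int) + (d.toList.length : Int))) := by
      simp [PySem.Str.slice]
    rw [hstep, PySem.List.slice_natCast_add]
    exact htake

-- an 'if P: if b: append' body as a single boolean test
theorem pv_if_if {α : Type} (P : Prop) [Decidable P] (b : Bool) (A C : α) :
    (if P then (if b then A else C) else C) = (if (decide P && b) = true then A else C) := by
  by_cases hP : P <;> cases b <;> simp [hP]

-- A's loop is 'start ++ filter' in closed form
theorem pv_compare_tool_eq_filter (s : String) (ds : List String) :
    compare_tool s ds = s :: ds.filter (fun d =>
      decide (PySem.Str.len s ≤ 2 * PySem.Str.len d) && PySem.Str.isIn d s) := by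
  unfold compare_tool
  rw [PySem.List.foldl_congr_mem ds _
    (fun value each =>
      if (decide (PySem.Str.len s ≤ 2 * PySem.Str.len each) && PySem.Str.isIn each s) = true
        then value ++ [each] else value) [s]
    (by intro acc x _; exact pv_if_if _ _ _ _)]
  exact PySem.List.foldl_append_if_eq_filter _ ds [s]

-- ===== VERDICT (by name: the statement is the Claim_ definition above) =====
theorem compare_tool_spec : Claim_equal_compare_tool := by
  intro s ds _
  unfold Spec_compare_tool
  rw [pv_compare_tool_eq_filter]
  show _ = compare_tool_alt s ds
  unfold compare_tool_alt
  simp only []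
  congr 1
  apply List.filter_congr
  intro d hd
  apply Bool.coe_iff_coe.mp
  rw [PySem.Set.contains_iff, pv_mem_subs s d ds hd]
  simp [PySem.Chars.isIn_iff_infix, PySem.Str.len_eq]
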